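-- pv_equiv track=rewrite | github.com/eesoyeon/Algorithm | 프로그래머스/1/82612. 부족한 금액 계산하기/부족한 금액 계산하기.py | solution
-- ===== SOURCE A (Python) =====
-- def solution(price, money, count):
--     sum_val = 0
--     for i in range(1, count+1):
--         sum_val += i
--
--     p = price*sum_val
--     if p > money:
--         return (p - money)
--     else:
--         return 0
-- ===== SOURCE B (Python) =====
-- def solution(price, money, count):
--     n = count if count > 0 else 0
--     lack = price * n * (n + 1) // 2 - money
--     return lack if lack > 0 else 0
-- ===== Notes on version B (the rewrite author's own statement) =====
-- stated objective: faster
-- what changed: Replaces the O(count) summation loop with the closed-form arithmetic-series formula n*(n+1)//2.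
import Mathlib
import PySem

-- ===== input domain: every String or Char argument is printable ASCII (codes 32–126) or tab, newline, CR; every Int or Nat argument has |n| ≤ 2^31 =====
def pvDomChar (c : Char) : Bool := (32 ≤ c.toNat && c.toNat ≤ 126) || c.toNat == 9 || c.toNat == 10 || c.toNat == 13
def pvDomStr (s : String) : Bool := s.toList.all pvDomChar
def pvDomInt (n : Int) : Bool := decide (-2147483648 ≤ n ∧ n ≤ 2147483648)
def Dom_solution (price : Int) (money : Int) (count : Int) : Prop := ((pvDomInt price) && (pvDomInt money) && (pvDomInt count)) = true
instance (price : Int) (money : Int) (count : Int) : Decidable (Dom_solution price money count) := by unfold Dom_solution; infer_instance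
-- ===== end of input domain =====

-- B replaces A's O(count) summation loop by the closed-form series sum n*(n+1)//2 (O(1)).

-- ===== PORT A =====
def solution (price : Int) (money : Int) (count : Int) : Int :=
  let sum_val := (PySem.List.pyRange 1 (count + 1) 1).foldl (fun acc i => acc + i) 0
  let p := price * sum_val
  if p > money then p - money else 0

-- ===== PORT B =====
def solution_alt (price : Int) (money : Int) (count : Int) : Int :=
  let n := if count > 0 then count else 0
  let lack := PySem.Int.floordiv (price * n * (n + 1)) 2 - money
  if lack > 0 then lack else 0

-- ===== PRECONDITION & SPEC =====
def Spec_solution (price : Int) (money : Int) (count : Int) (out : Int) : Prop := out = solution_alt price money count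
instance (price : Int) (money : Int) (count : Int) (out : Int) : Decidable (Spec_solution price money count out) := by unfold Spec_solution; infer_instance

-- ===== CLAIM (what is proved, stated in full; the proofs are below) =====
def Claim_equal_solution : Prop := ∀ (price : Int) (money : Int) (count : Int), Dom_solution price money count → Spec_solution price money count (solution price money count)

-- ===== LEMMAS AND PROOFS =====

-- twice the sum 1+2+…+n equals n*(n+1)
theorem two_mul_sum_range (n : Nat) :
    2 * (((List.range n).map (fun k : Nat => (1 : Int) + (k : Int))).sum) = (n : Int) * (n + 1) := by
  induction n with
  | zero => simp
  | succ m ih =>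
    rw [List.range_succ, List.map_append, List.sum_append]
    simp only [List.map_cons, List.map_nil, List.sum_cons, List.sum_nil]
    push_cast at ih ⊢
    nlinarith [ih]

-- A's loop computes the triangular number of max(count, 0)
theorem loop_sum_eq (count : Int) :
    2 * ((PySem.List.pyRange 1 (count + 1) 1).foldl (fun acc i => acc + i) 0)
      = (if count > 0 then count else 0) * ((if count > 0 then count else 0) + 1) := by
  have h := PySem.List.foldl_add (l := PySem.List.pyRange 1 (count + 1) 1) (g := fun (x : Int) => x) (a := 0)
  simp only [zero_add] at h
  rw [show (fun acc i => acc + i) = (fun acc (x : Int) => acc + (fun x => x) x) from rfl, h]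
  simp only [show (fun x : Int => x) = id from rfl, List.map_id]
  rw [PySem.List.pyRange_one]
  have h1 : count + 1 - 1 = count := by ring
  rw [h1]
  by_cases hc : count > 0
  · rw [if_pos hc]
    have hn : ((count.toNat : Int)) = count := Int.toNat_of_nonneg (le_of_lt hc)
    have h2 := two_mul_sum_range count.toNat
    rw [hn] at h2
    exact h2
  · rw [if_neg hc]
    have h0 : count.toNat = 0 := Int.toNat_of_nonpos (by omega)
    simp [h0]

-- ===== VERDICT (by name: the statement is the Claim_ definition above) =====
theorem solution_spec : Claim_equal_solution := by
  intro price money count _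
  unfold Spec_solution
  simp only [solution, solution_alt]
  have h := loop_sum_eq count
  generalize hS : (PySem.List.pyRange 1 (count + 1) 1).foldl (fun acc i => acc + i) 0 = s at h ⊢
  have e : price * (if count > 0 then count else 0) * ((if count > 0 then count else 0) + 1)
      = 2 * (price * s) := by rw [mul_assoc, ← h]; ring
  have hfd : PySem.Int.floordiv
      (price * (if count > 0 then count else 0) * ((if count > 0 then count else 0) + 1)) 2
      = price * s := by
    rw [e, PySem.Int.floordiv_eq_ediv_of_pos (by norm_num)]
    exact Int.mul_ediv_cancel_left _ (by norm_num)
  rw [hfd]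
  split_ifs <;> omega
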